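-- pv_equiv track=rewrite | github.com/miguelrego25/PycharmProjects | Laboratórios de Algoritmia II 2021-2022/Torneio4/amigos/main.py | constroi
-- ===== SOURCE A (Python) =====
-- def constroi(lista):
--     dic = {}
--     for grupo in lista:
--         for pessoa in grupo:
--             if pessoa not in dic:
--                 dic[pessoa] = set(grupo) - {pessoa}
--             else:
--                 dic[pessoa] = dic[pessoa] | set(grupo) - {pessoa}
--     return dic
-- ===== SOURCE B (Python) =====
-- def constroi(lista):
--     index = {}
--     for grupo in lista:
--         for pessoa in grupo:
--             index.setdefault(pessoa, []).append(grupo)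
--     return {pessoa: set().union(*grupos) - {pessoa}
--             for pessoa, grupos in index.items()}
-- ===== Notes on version B (the rewrite author's own statement) =====
-- stated objective: alternative
-- what changed: Replaces A's single nested loop with first-time/else set-union branching by a two-pass structure: first an index dict mapping each person to the list of their groups (keys in first-appearance order), then one aggregation pass computing set().union(*groups) - {person} per person.
import Mathlib
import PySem

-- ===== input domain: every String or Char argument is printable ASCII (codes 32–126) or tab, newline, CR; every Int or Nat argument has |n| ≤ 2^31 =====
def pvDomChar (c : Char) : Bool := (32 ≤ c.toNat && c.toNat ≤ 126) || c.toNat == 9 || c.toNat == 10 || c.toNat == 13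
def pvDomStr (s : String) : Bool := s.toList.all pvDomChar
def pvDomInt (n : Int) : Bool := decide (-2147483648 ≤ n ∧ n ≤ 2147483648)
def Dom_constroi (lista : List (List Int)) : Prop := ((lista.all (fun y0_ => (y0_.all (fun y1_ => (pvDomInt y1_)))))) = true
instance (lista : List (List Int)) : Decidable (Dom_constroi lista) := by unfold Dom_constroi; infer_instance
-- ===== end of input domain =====

-- B replaces A's single nested loop (first-time/else branching on each person) by a two-pass
-- index-then-aggregate structure of similar cost (objective: alternative decomposition).

-- ===== PORT A =====
def constroi (lista : List (List Int)) : List (Int × List Int) :=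
  (lista.foldl (fun dic grupo =>
      grupo.foldl (fun dic pessoa =>
        if dic.contains pessoa = false then
          dic.insert pessoa (PySem.Set.diff (PySem.Set.ofList grupo) [pessoa])
        else
          -- dic[pessoa] | set(grupo) - {pessoa}  ( '-' binds tighter than '|' )
          dic.insert pessoa (PySem.Set.union (dic.getD pessoa [])
            (PySem.Set.diff (PySem.Set.ofList grupo) [pessoa]))) dic)
    (PySem.Dict.empty : PySem.Dict Int (List Int))).items

-- ===== PORT B =====
-- set().union(*grupos): fold set.update over the person's groups starting from the empty set
def pvUnionAll (grupos : List (List Int)) : PySem.Set Int :=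
  grupos.foldl (fun s g => PySem.Set.update s g) PySem.Set.empty

def constroi_alt (lista : List (List Int)) : List (Int × List Int) :=
  let index : PySem.Dict Int (List (List Int)) :=
    lista.foldl (fun idx grupo =>
      grupo.foldl (fun idx pessoa =>
        -- index.setdefault(pessoa, []).append(grupo)
        idx.modify pessoa [] (fun gs => gs ++ [grupo])) idx)
      PySem.Dict.empty
  -- dict comprehension over index.items (keys already distinct): person ↦ union of their groups minus themselves
  index.items.map (fun pg => (pg.1, PySem.Set.diff (pvUnionAll pg.2) [pg.1]))

-- ===== PRECONDITION & SPEC =====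
def Spec_constroi (lista : List (List Int)) (out : List (Int × List Int)) : Prop := out = constroi_alt lista
instance (lista : List (List Int)) (out : List (Int × List Int)) : Decidable (Spec_constroi lista out) := by unfold Spec_constroi; infer_instance

-- ===== CLAIM (what is proved, stated in full; the proofs are below) =====
def Claim_equal_constroi : Prop := ∀ (lista : List (List Int)), Dom_constroi lista → Spec_constroi lista (constroi lista)

-- ===== LEMMAS AND PROOFS =====

-- B's aggregation applied to one index entry
def pvVal (pg : Int × List (List Int)) : Int × List Int :=
  (pg.1, PySem.Set.diff (pvUnionAll pg.2) [pg.1])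

-- B's index dict, viewed through the aggregation as A's friendship dict
def pvM (idx : PySem.Dict Int (List (List Int))) : PySem.Dict Int (List Int) :=
  ⟨idx.items.map pvVal⟩

theorem pvUnionAll_append (gs : List (List Int)) (g : List Int) :
    pvUnionAll (gs ++ [g]) = PySem.Set.update (pvUnionAll gs) g := by
  simp [pvUnionAll]

theorem pv_crux (S : PySem.Set Int) (g : List Int) (p : Int) :
    PySem.Set.diff (PySem.Set.update S g) [p]
      = PySem.Set.union (PySem.Set.diff S [p]) (PySem.Set.diff (PySem.Set.ofList g) [p]) := by
  simp only [PySem.Set.union, PySem.Set.diff, PySem.Set.update_eq_append_filter,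
    List.filter_append]
  congr 1
  have h := PySem.Set.ofList_eq_self_of_nodup
    (List.filter (fun x => !PySem.Set.contains [p] x) (PySem.Set.ofList g))
    (List.Nodup.filter _ (PySem.Set.nodup_ofList g))
  rw [h, List.filter_filter, List.filter_filter]
  apply List.filter_congr
  intro x hx
  by_cases hxp : x = p <;> by_cases hxS : x ∈ S <;>
    simp [hxp, hxS, PySem.Set.contains_eq_listContains, List.mem_filter]

theorem pv_get?_map (l : List (Int × List (List Int))) (k : Int) :
    (PySem.Dict.mk (l.map pvVal)).get? k
      = ((PySem.Dict.mk l).get? k).map (fun gs => PySem.Set.diff (pvUnionAll gs) [k]) := by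
  induction l with
  | nil => simp [PySem.Dict.get?]
  | cons a t ih =>
    obtain ⟨a1, a2⟩ := a
    simp only [List.map_cons, pvVal, PySem.Dict.get?_mk_cons]
    by_cases h : a1 = k
    · subst h; simp
    · simp [h, ih, beq_iff_eq]

theorem pv_get?_M (idx : PySem.Dict Int (List (List Int))) (k : Int) :
    (pvM idx).get? k = (idx.get? k).map (fun gs => PySem.Set.diff (pvUnionAll gs) [k]) :=
  pv_get?_map idx.items k

theorem pv_contains_map (idx : PySem.Dict Int (List (List Int))) (k : Int) :
    (pvM idx).contains k = idx.contains k := by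
  rw [PySem.Dict.contains_eq_isSome_get?, PySem.Dict.contains_eq_isSome_get?, pv_get?_M]
  cases idx.get? k <;> rfl

theorem pv_step (idx : PySem.Dict Int (List (List Int))) (g : List Int) (p : Int)
    (hnd : idx.keys.Nodup) :
    pvM (idx.modify p [] (fun gs => gs ++ [g]))
      = (if (pvM idx).contains p = false then
          (pvM idx).insert p (PySem.Set.diff (PySem.Set.ofList g) [p])
        else
          (pvM idx).insert p (PySem.Set.union ((pvM idx).getD p [])
            (PySem.Set.diff (PySem.Set.ofList g) [p]))) := by
  rw [pv_contains_map]
  by_cases hc : idx.contains p = true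
  · -- p already a key
    obtain ⟨gs0, hsome⟩ : ∃ gs0, idx.get? p = some gs0 := by
      rw [PySem.Dict.contains_eq_isSome_get?] at hc
      exact Option.isSome_iff_exists.mp hc
    have hgd : idx.getD p [] = gs0 := PySem.Dict.getD_of_get?_eq_some idx [] hsome
    have hMgd : (pvM idx).getD p [] = PySem.Set.diff (pvUnionAll gs0) [p] := by
      rw [PySem.Dict.getD_eq_get?_getD, pv_get?_M, hsome]; rfl
    have hMc : (pvM idx).contains p = true := by rw [pv_contains_map]; exact hc
    rw [if_neg (by simp [hc])]
    apply PySem.Dict.ext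
    rw [show idx.modify p [] (fun gs => gs ++ [g]) = idx.insert p (gs0 ++ [g]) by
      simp [PySem.Dict.modify, hgd]]
    show ((idx.insert p (gs0 ++ [g])).items.map pvVal) = _
    rw [PySem.Dict.items_insert_of_contains _ _ hc,
        PySem.Dict.items_insert_of_contains _ _ hMc, hMgd]
    show _ = (idx.items.map pvVal).map _
    rw [List.map_map, List.map_map]
    apply List.map_congr_left
    intro q hq
    obtain ⟨q1, q2⟩ := q
    by_cases hqp : q1 = p
    · subst hqp
      have : idx.get? q1 = some q2 := PySem.Dict.get?_of_mem_items idx hq hnd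
      rw [hsome] at this
      obtain rfl : gs0 = q2 := by injection this
      simp only [Function.comp, pvVal, beq_self_eq_true, if_true]
      rw [pvUnionAll_append, pv_crux]
    · simp [Function.comp, pvVal, hqp]
  · -- new key
    have hc' : idx.contains p = false := by simpa using hc
    have hMc : (pvM idx).contains p = false := by rw [pv_contains_map]; exact hc'
    have hgd : idx.getD p [] = [] := PySem.Dict.getD_of_not_contains idx [] hc'
    rw [if_pos (by simp [hc'])]
    apply PySem.Dict.ext
    rw [show idx.modify p [] (fun gs => gs ++ [g]) = idx.insert p [g] by
      simp [PySem.Dict.modify, hgd]]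
    show ((idx.insert p [g]).items.map pvVal) = _
    rw [PySem.Dict.items_insert_of_not_contains _ _ hc',
        PySem.Dict.items_insert_of_not_contains _ _ hMc]
    show _ = (idx.items.map pvVal) ++ _
    rw [List.map_append]
    rfl

theorem pv_inner (g : List Int) (l : List Int) (idx : PySem.Dict Int (List (List Int)))
    (hnd : idx.keys.Nodup) :
    l.foldl (fun dic pessoa =>
        if dic.contains pessoa = false then
          dic.insert pessoa (PySem.Set.diff (PySem.Set.ofList g) [pessoa])
        else
          dic.insert pessoa (PySem.Set.union (dic.getD pessoa [])
            (PySem.Set.diff (PySem.Set.ofList g) [pessoa]))) (pvM idx)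
      = pvM (l.foldl (fun idx pessoa => idx.modify pessoa [] (fun gs => gs ++ [g])) idx) := by
  induction l generalizing idx with
  | nil => rfl
  | cons p t ih =>
    simp only [List.foldl_cons]
    rw [← pv_step idx g p hnd]
    exact ih _ (PySem.Dict.nodup_keys_insert _ _ _ hnd)

theorem pv_inner_nodup (g : List Int) (l : List Int) (idx : PySem.Dict Int (List (List Int)))
    (hnd : idx.keys.Nodup) :
    (l.foldl (fun idx pessoa => idx.modify pessoa [] (fun gs => gs ++ [g])) idx).keys.Nodup := by
  induction l generalizing idx with
  | nil => exact hnd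
  | cons p t ih => exact ih _ (PySem.Dict.nodup_keys_insert _ _ _ hnd)

theorem pv_outer (lista : List (List Int)) (idx : PySem.Dict Int (List (List Int)))
    (hnd : idx.keys.Nodup) :
    lista.foldl (fun dic grupo =>
        grupo.foldl (fun dic pessoa =>
          if dic.contains pessoa = false then
            dic.insert pessoa (PySem.Set.diff (PySem.Set.ofList grupo) [pessoa])
          else
            dic.insert pessoa (PySem.Set.union (dic.getD pessoa [])
              (PySem.Set.diff (PySem.Set.ofList grupo) [pessoa]))) dic) (pvM idx)
      = pvM (lista.foldl (fun idx grupo =>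
          grupo.foldl (fun idx pessoa => idx.modify pessoa [] (fun gs => gs ++ [grupo])) idx) idx) := by
  induction lista generalizing idx with
  | nil => rfl
  | cons g t ih =>
    simp only [List.foldl_cons]
    rw [pv_inner g g idx hnd]
    exact ih _ (pv_inner_nodup g g idx hnd)

-- ===== VERDICT (by name: the statement is the Claim_ definition above) =====
theorem constroi_spec : Claim_equal_constroi := by
  intro lista _
  unfold Spec_constroi constroi constroi_alt
  rw [show (PySem.Dict.empty : PySem.Dict Int (List Int)) = pvM PySem.Dict.empty from rfl,
      pv_outer lista PySem.Dict.empty PySem.Dict.nodup_keys_empty]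
  rfl
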